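-- pv_equiv track=rewrite | github.com/OuluBSD/SuperShader | modules/lighting/data_flow_validator_full.py | _validate_semantic_compatibility
-- ===== SOURCE A (Python) =====
-- def _validate_semantic_compatibility(source_semantic: str, target_semantic: str) -> bool:
--     """Validate if two semantics are compatible"""
--     if not source_semantic or not target_semantic:
--         return True  # No semantic means compatible
--
--     # Common semantic compatibility rules
--     semantic_groups = [
--         {'position', 'pos', 'fragpos', 'worldpos'},
--         {'normal', 'norm', 'n'},
--         {'tex_coords', 'uv', 'texcoord'},
--         {'color', 'col', 'albedo', 'diffuse'},
--         {'light', 'light_color', 'lightdir', 'light_dir'},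
--         {'tangent', 't'},
--         {'bitangent', 'binormal', 'b'}
--     ]
--
--     for group in semantic_groups:
--         if source_semantic in group and target_semantic in group:
--             return True
--
--     return source_semantic == target_semantic
-- ===== SOURCE B (Python) =====
-- # B: inverted index (name -> group id) built once; two O(1) lookups replace the group-scanning loop.
-- _SEMANTIC_GROUPS = [
--     ['position', 'pos', 'fragpos', 'worldpos'],
--     ['normal', 'norm', 'n'],
--     ['tex_coords', 'uv', 'texcoord'],
--     ['color', 'col', 'albedo', 'diffuse'],
--     ['light', 'light_color', 'lightdir', 'light_dir'],
--     ['tangent', 't'],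
--     ['bitangent', 'binormal', 'b'],
-- ]
--
-- _GROUP_OF = {}
-- for _i, _group in enumerate(_SEMANTIC_GROUPS):
--     for _name in _group:
--         _GROUP_OF[_name] = _i
--
--
-- def _validate_semantic_compatibility(source_semantic: str, target_semantic: str) -> bool:
--     if not source_semantic or not target_semantic:
--         return True
--     gs = _GROUP_OF.get(source_semantic)
--     gt = _GROUP_OF.get(target_semantic)
--     if gs is not None and gs == gt:
--         return True
--     return source_semantic == target_semantic
-- ===== Notes on version B (the rewrite author's own statement) =====
-- stated objective: simpler
-- what changed: Replaces the per-call scan over seven group sets with a precomputed inverted index mapping each semantic name to its group id, so the function body becomes two lookups and one comparison.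
import Mathlib
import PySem

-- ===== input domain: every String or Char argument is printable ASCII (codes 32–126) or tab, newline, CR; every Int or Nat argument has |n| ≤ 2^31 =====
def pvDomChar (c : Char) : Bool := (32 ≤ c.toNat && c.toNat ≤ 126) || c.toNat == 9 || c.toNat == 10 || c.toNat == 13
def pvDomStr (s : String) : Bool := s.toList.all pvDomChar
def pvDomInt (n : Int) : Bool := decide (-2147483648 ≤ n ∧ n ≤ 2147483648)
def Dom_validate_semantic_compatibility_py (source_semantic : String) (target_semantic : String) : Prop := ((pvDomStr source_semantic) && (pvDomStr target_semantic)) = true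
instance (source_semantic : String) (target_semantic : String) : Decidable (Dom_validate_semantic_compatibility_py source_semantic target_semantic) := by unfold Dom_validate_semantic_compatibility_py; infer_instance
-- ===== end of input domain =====

-- B replaces A's per-call scan over seven group sets by a precomputed name→group-id index
-- (two lookups + one comparison); objective: simpler per-call logic, same results.


-- ===== PORT A =====
-- the seven semantic group sets, in A's list order
def pvSemanticGroups : List (PySem.Set String) :=
  [PySem.Set.ofList ["position", "pos", "fragpos", "worldpos"],
   PySem.Set.ofList ["normal", "norm", "n"],
   PySem.Set.ofList ["tex_coords", "uv", "texcoord"],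
   PySem.Set.ofList ["color", "col", "albedo", "diffuse"],
   PySem.Set.ofList ["light", "light_color", "lightdir", "light_dir"],
   PySem.Set.ofList ["tangent", "t"],
   PySem.Set.ofList ["bitangent", "binormal", "b"]]

-- 'for group in semantic_groups: if src in group and tgt in group: return True' then 'return src == tgt'
def pvScanGroups (source_semantic : String) (target_semantic : String) : List (PySem.Set String) → Bool
  | [] => source_semantic == target_semantic
  | g :: gs =>
      if PySem.Set.contains g source_semantic && PySem.Set.contains g target_semantic then true
      else pvScanGroups source_semantic target_semantic gs

def validate_semantic_compatibility_py (source_semantic : String) (target_semantic : String) : Bool :=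
  if source_semantic == "" || target_semantic == "" then true
  else pvScanGroups source_semantic target_semantic pvSemanticGroups

-- ===== PORT B =====
-- B's module-level group lists (plain lists, B iterates them deterministically)
def pvSemanticGroupsB : List (List String) :=
  [["position", "pos", "fragpos", "worldpos"],
   ["normal", "norm", "n"],
   ["tex_coords", "uv", "texcoord"],
   ["color", "col", "albedo", "diffuse"],
   ["light", "light_color", "lightdir", "light_dir"],
   ["tangent", "t"],
   ["bitangent", "binormal", "b"]]

-- _GROUP_OF built by the two nested for-loops over enumerate(_SEMANTIC_GROUPS)
def pvGroupOf : PySem.Dict String Int :=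
  (PySem.List.enumerate pvSemanticGroupsB 0).foldl
    (fun d p => p.2.foldl (fun d name => d.insert name p.1) d) PySem.Dict.empty

def validate_semantic_compatibility_py_alt (source_semantic : String) (target_semantic : String) : Bool :=
  if source_semantic == "" || target_semantic == "" then true
  else
    match pvGroupOf.get? source_semantic, pvGroupOf.get? target_semantic with
    | some gs, some gt => if gs == gt then true else source_semantic == target_semantic
    | _, _ => source_semantic == target_semantic

-- ===== PRECONDITION & SPEC =====
def Spec_validate_semantic_compatibility_py (source_semantic : String) (target_semantic : String) (out : Bool) : Prop := out = validate_semantic_compatibility_py_alt source_semantic target_semantic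
instance (source_semantic : String) (target_semantic : String) (out : Bool) : Decidable (Spec_validate_semantic_compatibility_py source_semantic target_semantic out) := by unfold Spec_validate_semantic_compatibility_py; infer_instance

-- ===== CLAIM (what is proved, stated in full; the proofs are below) =====
def Claim_equal_validate_semantic_compatibility_py : Prop := ∀ (source_semantic : String) (target_semantic : String), Dom_validate_semantic_compatibility_py source_semantic target_semantic → Spec_validate_semantic_compatibility_py source_semantic target_semantic (validate_semantic_compatibility_py source_semantic target_semantic)

-- ===== LEMMAS AND PROOFS =====

-- all 22 semantic names, in index order
def pvAllNames : List String :=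
  ["position", "pos", "fragpos", "worldpos", "normal", "norm", "n",
   "tex_coords", "uv", "texcoord", "color", "col", "albedo", "diffuse",
   "light", "light_color", "lightdir", "light_dir", "tangent", "t",
   "bitangent", "binormal", "b"]

lemma pvKeys_groupOf : pvGroupOf.keys = pvAllNames := by decide

lemma pvScan_of_right_notin (s t : String) (gs : List (PySem.Set String))
    (h : ∀ g ∈ gs, PySem.Set.contains g t = false) :
    pvScanGroups s t gs = (s == t) := by
  induction gs with
  | nil => rfl
  | cons g rest ih =>
      rw [pvScanGroups, h g (List.mem_cons_self ..)]
      simp only [Bool.and_false, Bool.false_eq_true, if_false]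
      exact ih (fun g' hg' => h g' (List.mem_cons_of_mem _ hg'))

lemma pvScan_of_left_notin (s t : String) (gs : List (PySem.Set String))
    (h : ∀ g ∈ gs, PySem.Set.contains g s = false) :
    pvScanGroups s t gs = (s == t) := by
  induction gs with
  | nil => rfl
  | cons g rest ih =>
      rw [pvScanGroups, h g (List.mem_cons_self ..)]
      simp only [Bool.false_and, Bool.false_eq_true, if_false]
      exact ih (fun g' hg' => h g' (List.mem_cons_of_mem _ hg'))

lemma pvNotin_contains (x : String) (hx : x ∉ pvAllNames) :
    ∀ g ∈ pvSemanticGroups, PySem.Set.contains g x = false := by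
  intro g hg
  rw [Bool.eq_false_iff]
  intro hc
  rw [PySem.Set.contains_iff] at hc
  apply hx
  simp only [pvSemanticGroups, List.mem_cons, List.not_mem_nil, or_false] at hg
  rcases hg with rfl | rfl | rfl | rfl | rfl | rfl | rfl <;>
    (rw [PySem.Set.mem_ofList] at hc; simp only [pvAllNames, List.mem_cons]; simp at hc; tauto)

lemma pvNotin_get? (x : String) (hx : x ∉ pvAllNames) : pvGroupOf.get? x = none := by
  rw [PySem.Dict.get?_eq_none_iff_not_mem_keys, pvKeys_groupOf]
  exact hx

lemma pvCore (s t : String) :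
    pvScanGroups s t pvSemanticGroups =
      (match pvGroupOf.get? s, pvGroupOf.get? t with
       | some gs, some gt => if gs == gt then true else s == t
       | _, _ => (s == t)) := by
  by_cases hs : s ∈ pvAllNames
  · by_cases ht : t ∈ pvAllNames
    · simp only [pvAllNames, List.mem_cons, List.not_mem_nil, or_false] at hs ht
      rcases hs with rfl|rfl|rfl|rfl|rfl|rfl|rfl|rfl|rfl|rfl|rfl|rfl|rfl|rfl|rfl|rfl|rfl|rfl|rfl|rfl|rfl|rfl|rfl <;>
      rcases ht with rfl|rfl|rfl|rfl|rfl|rfl|rfl|rfl|rfl|rfl|rfl|rfl|rfl|rfl|rfl|rfl|rfl|rfl|rfl|rfl|rfl|rfl|rfl <;>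
      decide
    · rw [pvScan_of_right_notin s t _ (pvNotin_contains t ht), pvNotin_get? t ht]
      cases pvGroupOf.get? s <;> rfl
  · rw [pvScan_of_left_notin s t _ (pvNotin_contains s hs), pvNotin_get? s hs]

-- ===== VERDICT (by name: the statement is the Claim_ definition above) =====
theorem validate_semantic_compatibility_py_spec : Claim_equal_validate_semantic_compatibility_py := by
  intro s t _
  unfold Spec_validate_semantic_compatibility_py validate_semantic_compatibility_py validate_semantic_compatibility_py_alt
  by_cases h : (s == "" || t == "") = true
  · rw [if_pos h, if_pos h]
  · rw [if_neg h, if_neg h]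
    exact pvCore s t
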